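-- pv_equiv track=rewrite | github.com/Omprakash-777/Python_Projects | flames_game.py | remove_common_chars
-- ===== SOURCE A (Python) =====
-- def remove_common_chars(name1, name2):
--     name1 = list(name1)
--     name2 = list(name2)
--
--     for i in name1[:]:
--         if i in name2:
--             name1.remove(i)
--             name2.remove(i)
--
--     return len(name1) + len(name2)
-- ===== SOURCE B (Python) =====
-- def remove_common_chars(name1, name2):
--     counts = {}
--     for ch in name1:
--         counts[ch] = counts.get(ch, 0) + 1
--     for ch in name2:
--         counts[ch] = counts.get(ch, 0) - 1
--     return sum(abs(v) for v in counts.values())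
-- ===== Notes on version B (the rewrite author's own statement) =====
-- stated objective: faster
-- what changed: Replaces the quadratic loop of membership tests and list.remove calls with a single character-count dictionary, returning the sum of absolute count differences.
import Mathlib
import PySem

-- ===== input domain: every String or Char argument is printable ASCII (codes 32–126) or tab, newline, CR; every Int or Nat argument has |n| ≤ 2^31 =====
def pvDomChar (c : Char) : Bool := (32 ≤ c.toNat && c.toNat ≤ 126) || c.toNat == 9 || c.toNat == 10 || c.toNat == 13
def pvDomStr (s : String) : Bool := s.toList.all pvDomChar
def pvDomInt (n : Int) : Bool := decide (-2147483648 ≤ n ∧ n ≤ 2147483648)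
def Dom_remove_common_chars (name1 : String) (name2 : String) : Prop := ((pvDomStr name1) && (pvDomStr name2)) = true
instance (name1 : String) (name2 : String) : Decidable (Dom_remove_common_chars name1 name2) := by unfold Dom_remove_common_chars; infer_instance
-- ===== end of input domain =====

-- B replaces A's quadratic remove-loop by a single character-count dictionary (sum of absolute count differences); measured asymptotically faster.


-- ===== PORT A =====
-- the loop body: 'if i in name2: name1.remove(i); name2.remove(i)'.
-- list.remove never raises here: the guard gives i ∈ name2, and i ∈ name1 holds because i comes
-- from the copy name1[:] and at most the earlier occurrences of i were removed; so '.getD' is exact.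
def pvStepA (st : List Char × List Char) (i : Char) : List Char × List Char :=
  if i ∈ st.2 then
    ((PySem.List.remove? st.1 i).getD st.1, (PySem.List.remove? st.2 i).getD st.2)
  else st

def remove_common_chars (name1 : String) (name2 : String) : Int :=
  let n1 := name1.toList
  let n2 := name2.toList
  let st := n1.foldl pvStepA (n1, n2)   -- 'for i in name1[:]' iterates the unmutated copy
  (st.1.length : Int) + (st.2.length : Int)

-- ===== PORT B =====
def remove_common_chars_alt (name1 : String) (name2 : String) : Int :=
  let c1 := name1.toList.foldl (fun d ch => d.insert ch (d.getD ch 0 + 1))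
      (PySem.Dict.empty : PySem.Dict Char Int)
  let c2 := name2.toList.foldl (fun d ch => d.insert ch (d.getD ch 0 - 1)) c1
  c2.values.foldl (fun s v => s + |v|) 0

-- ===== PRECONDITION & SPEC =====
def Spec_remove_common_chars (name1 : String) (name2 : String) (out : Int) : Prop := out = remove_common_chars_alt name1 name2
instance (name1 : String) (name2 : String) (out : Int) : Decidable (Spec_remove_common_chars name1 name2 out) := by unfold Spec_remove_common_chars; infer_instance

-- ===== CLAIM (what is proved, stated in full; the proofs are below) =====
def Claim_equal_remove_common_chars : Prop := ∀ (name1 : String) (name2 : String), Dom_remove_common_chars name1 name2 → Spec_remove_common_chars name1 name2 (remove_common_chars name1 name2)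

-- ===== LEMMAS AND PROOFS =====

-- A's loop: processing the remaining list l (a sub-multiset of the current name1) leaves
-- len(name1)+len(name2) = original lengths minus twice the multiset intersection of l with name2.
lemma foldl_stepA_length (l : List Char) :
    ∀ (n1 n2 : List Char), (l : Multiset Char) ≤ (n1 : Multiset Char) →
    (((l.foldl pvStepA (n1, n2)).1.length : Int) + ((l.foldl pvStepA (n1, n2)).2.length : Int))
      = (n1.length : Int) + (n2.length : Int)
        - 2 * (((l : Multiset Char) ∩ (n2 : Multiset Char)).card : Int) := by
  induction l with
  | nil => simp
  | cons i t ih =>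
    intro n1 n2 hle
    have hi1 : i ∈ n1 := by
      have : i ∈ ((i :: t : List Char) : Multiset Char) := by simp
      exact Multiset.mem_coe.mp (Multiset.mem_of_le hle this)
    have htle : (t : Multiset Char) ≤ ((n1.erase i : List Char) : Multiset Char) := by
      rw [← Multiset.coe_erase]
      exact (Multiset.cons_le_cons_iff i).mp
        (le_trans (le_of_eq (Multiset.cons_coe i t).symm)
          (le_trans hle (le_of_eq (Multiset.cons_erase (Multiset.mem_coe.mpr hi1)).symm)))
    simp only [List.foldl_cons]
    by_cases h2 : i ∈ n2
    · have hstep : pvStepA (n1, n2) i = (n1.erase i, n2.erase i) := by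
        simp [pvStepA, h2, PySem.List.remove?_eq_some_erase _ _ hi1,
          PySem.List.remove?_eq_some_erase _ _ h2]
      rw [hstep, ih _ _ htle]
      have hint : ((i :: t : List Char) : Multiset Char) ∩ (n2 : Multiset Char)
          = i ::ₘ ((t : Multiset Char) ∩ ((n2.erase i : List Char) : Multiset Char)) := by
        rw [← Multiset.cons_coe, Multiset.cons_inter_of_pos _ (by simpa using h2)]
        simp [Multiset.coe_erase]
      rw [hint]
      have l1 : (n1.erase i).length + 1 = n1.length := List.length_erase_add_one hi1
      have l2 : (n2.erase i).length + 1 = n2.length := List.length_erase_add_one h2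
      simp only [Multiset.card_cons]
      push_cast [← l1, ← l2]
      ring
    · have hstep : pvStepA (n1, n2) i = (n1, n2) := by simp [pvStepA, h2]
      have hle' : (t : Multiset Char) ≤ (n1 : Multiset Char) :=
        le_trans (by rw [← Multiset.cons_coe]; exact Multiset.le_cons_self _ _) hle
      rw [hstep, ih _ _ hle']
      have hint : ((i :: t : List Char) : Multiset Char) ∩ (n2 : Multiset Char)
          = (t : Multiset Char) ∩ (n2 : Multiset Char) := by
        rw [← Multiset.cons_coe, Multiset.cons_inter_of_neg _ (by simpa using h2)]
      rw [hint]

-- B's second loop subtracts one per occurrence (mirror of PySem.Dict.getD_foldl_insert_add_one)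
lemma getD_foldl_insert_sub_one (l : List Char) (d : PySem.Dict Char Int) (v : Char) :
    (l.foldl (fun d x => d.insert x (d.getD x 0 - 1)) d).getD v 0
      = d.getD v 0 - l.count v := by
  induction l generalizing d with
  | nil => simp
  | cons x t ih =>
    simp only [List.foldl_cons, ih, PySem.Dict.getD_insert, List.count_cons]
    by_cases h : v = x
    · simp [h]; omega
    · simp [h, Ne.symm h]

lemma pv_abs_sub_eq (a b : Nat) :
    |(a : Int) - (b : Int)| = (a : Int) + b - 2 * min (a : Int) b := by
  rcases le_total (a : Int) b with h | h
  · rw [abs_of_nonpos (by omega), min_eq_left h]; ring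
  · rw [abs_of_nonneg (by omega), min_eq_right h]; ring

-- the arithmetic core: over any nodup key list covering both strings' characters,
-- Σ |count₁ - count₂| = len₁ + len₂ - 2·|multiset intersection|
lemma sum_abs_counts (K xs ys : List Char) (hnd : K.Nodup)
    (hmem : ∀ k, k ∈ xs ∨ k ∈ ys → k ∈ K) :
    (K.map (fun k => |((xs.count k : Int)) - (ys.count k : Int)|)).sum
      = (xs.length : Int) + (ys.length : Int)
        - 2 * ((((xs : Multiset Char)) ∩ (ys : Multiset Char)).card : Int) := by
  rw [← List.sum_toFinset _ hnd]
  have hcount : ∀ (zs : List Char), (∀ k, k ∈ zs → k ∈ K) →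
      ∑ k ∈ K.toFinset, (zs.count k : Int) = (zs.length : Int) := by
    intro zs hz
    have base : ∑ x ∈ zs.toFinset, zs.count x = zs.length := by
      simpa using Multiset.toFinset_sum_count_eq (zs : Multiset Char)
    rw [← Nat.cast_sum]
    rw [show (∑ k ∈ K.toFinset, zs.count k) = zs.length from ?_]
    rw [← base]
    refine (Finset.sum_subset ?_ ?_).symm
    · intro a ha; simp only [List.mem_toFinset] at *; exact hz a ha
    · intro a _ ha; simp only [List.mem_toFinset] at ha; exact List.count_eq_zero.mpr ha
  have hx := hcount xs (fun k hk => hmem k (Or.inl hk))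
  have hy := hcount ys (fun k hk => hmem k (Or.inr hk))
  have hcnt : ∀ k, ((xs : Multiset Char) ∩ (ys : Multiset Char)).count k
      = min (xs.count k) (ys.count k) := by
    intro k; rw [Multiset.count_inter]; simp
  have hm : ∑ k ∈ K.toFinset, min (xs.count k : Int) (ys.count k : Int)
      = ((((xs : Multiset Char)) ∩ (ys : Multiset Char)).card : Int) := by
    have hsub : ((xs : Multiset Char) ∩ (ys : Multiset Char)).toFinset ⊆ K.toFinset := by
      intro a ha
      simp only [Multiset.mem_toFinset, List.mem_toFinset] at *
      exact hmem a (Or.inl (by simpa using Multiset.mem_of_le Multiset.inter_le_left ha))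
    have hzero : ∀ a ∈ K.toFinset,
        a ∉ ((xs : Multiset Char) ∩ (ys : Multiset Char)).toFinset →
        min (xs.count a : Int) (ys.count a : Int) = 0 := by
      intro a _ ha
      simp only [Multiset.mem_toFinset] at ha
      have h0 := Multiset.count_eq_zero.mpr ha
      rw [hcnt] at h0
      rw [← Nat.cast_min, h0]; rfl
    rw [← Finset.sum_subset hsub hzero]
    rw [Finset.sum_congr rfl (fun k _ => by rw [← Nat.cast_min, ← hcnt k])]
    exact_mod_cast congrArg Nat.cast
      (Multiset.toFinset_sum_count_eq ((xs : Multiset Char) ∩ (ys : Multiset Char)))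
  calc ∑ k ∈ K.toFinset, |((xs.count k : Int)) - (ys.count k : Int)|
      = ∑ k ∈ K.toFinset, ((xs.count k : Int) + (ys.count k : Int)
          - 2 * min (xs.count k : Int) (ys.count k : Int)) :=
        Finset.sum_congr rfl (fun k _ => pv_abs_sub_eq _ _)
    _ = (∑ k ∈ K.toFinset, (xs.count k : Int)) + (∑ k ∈ K.toFinset, (ys.count k : Int))
          - 2 * ∑ k ∈ K.toFinset, min (xs.count k : Int) (ys.count k : Int) := by
        rw [Finset.sum_sub_distrib, Finset.sum_add_distrib, Finset.mul_sum]
    _ = _ := by rw [hx, hy, hm]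

-- ===== VERDICT (by name: the statement is the Claim_ definition above) =====
-- B's value: the dict built by the two loops maps each key to count₁ - count₂
lemma alt_eq (name1 name2 : String) :
    remove_common_chars_alt name1 name2
      = ((PySem.Set.update (PySem.Set.ofList name1.toList) name2.toList).map
          (fun k => |((name1.toList.count k : Int)) - (name2.toList.count k : Int)|)).sum := by
  simp only [remove_common_chars_alt]
  set xs := name1.toList
  set ys := name2.toList
  rw [PySem.Dict.foldl_insert_getD_add_one_eq_counter]
  set c2 := ys.foldl (fun d ch => d.insert ch (d.getD ch 0 - 1)) (PySem.Dict.counter xs) with hc2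
  have hkeys : c2.keys = PySem.Set.update (PySem.Set.ofList xs) ys := by
    rw [hc2, PySem.Dict.keys_foldl_insert, PySem.Dict.keys_counter]
  have hnd : c2.keys.Nodup := by
    rw [hkeys]
    exact PySem.Set.nodup_update _ _ (PySem.Set.nodup_ofList xs)
  rw [PySem.List.foldl_add c2.values (fun v => |v|) 0]
  rw [PySem.Dict.values_eq_map_keys c2 hnd 0]
  rw [List.map_map, hkeys]
  rw [zero_add]
  refine congrArg List.sum (List.map_congr_left ?_)
  intro k _
  simp only [Function.comp]
  rw [hc2, getD_foldl_insert_sub_one, PySem.Dict.getD_counter]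

theorem remove_common_chars_spec : Claim_equal_remove_common_chars := by
  intro name1 name2 _
  unfold Spec_remove_common_chars remove_common_chars
  set xs := name1.toList with hxs
  set ys := name2.toList with hys
  rw [foldl_stepA_length xs xs ys (le_refl _), alt_eq, hxs, hys]
  rw [sum_abs_counts (PySem.Set.update (PySem.Set.ofList xs) ys) xs ys
    (PySem.Set.nodup_update _ _ (PySem.Set.nodup_ofList xs))
    (fun k hk => (PySem.Set.mem_update _ _ _).mpr
      (hk.imp (fun h => (PySem.Set.mem_ofList _ _).mpr h) id))]
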